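-- pv_equiv track=rewrite | github.com/mango2528/Assignment | H (9주차)/H2.py | get_contain
-- ===== SOURCE A (Python) =====
-- def get_contain(l1 : list, l2 : list) -> list :
--     result = list()
--     sub = list()
--     obj = list()
--
--     if (len(l1) > len(l2)) :
--         sub = l1
--         obj = l2
--     else :
--         sub = l2
--         obj = l1
--
--     for i in range(len(sub)) :
--         if (sub[i] in obj and not sub[i] in result) :
--             result.append(sub[i])
--
--     return sorted(result, reverse=True)
-- ===== SOURCE B (Python) =====
-- def get_contain(l1: list, l2: list) -> list:
--     return sorted(set(l1) & set(l2), reverse=True)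
-- ===== Notes on version B (the rewrite author's own statement) =====
-- stated objective: idiomatic
-- what changed: Replaced the size-branch, index loop and manual membership/dedup scans with set intersection plus a descending sort.
import Mathlib
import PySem

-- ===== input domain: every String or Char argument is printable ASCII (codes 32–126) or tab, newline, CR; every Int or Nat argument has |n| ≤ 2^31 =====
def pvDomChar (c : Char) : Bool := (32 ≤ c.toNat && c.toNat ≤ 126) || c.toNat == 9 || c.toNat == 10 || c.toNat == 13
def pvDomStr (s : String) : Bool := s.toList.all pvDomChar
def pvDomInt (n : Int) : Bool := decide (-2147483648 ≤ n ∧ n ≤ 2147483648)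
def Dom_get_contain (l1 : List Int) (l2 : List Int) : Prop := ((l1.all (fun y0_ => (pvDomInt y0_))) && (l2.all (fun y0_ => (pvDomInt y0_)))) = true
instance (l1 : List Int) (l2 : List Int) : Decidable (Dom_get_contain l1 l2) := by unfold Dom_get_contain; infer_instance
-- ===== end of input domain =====

-- B replaces A's size-branch, index loop and manual membership/dedup scans with
-- set intersection plus a descending sort (idiomatic; asymptotically cheaper).
-- ===== PORT A =====
def get_contain (l1 : List Int) (l2 : List Int) : List Int :=
  let so : List Int × List Int := if l1.length > l2.length then (l1, l2) else (l2, l1)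
  let sub := so.1
  let obj := so.2
  let result : List Int :=
    (PySem.List.pyRange 0 (PySem.List.len sub) 1).foldl
      (fun result i =>
        if obj.contains (PySem.List.pyGetD sub i 0) &&
           !(result.contains (PySem.List.pyGetD sub i 0)) then
          result ++ [PySem.List.pyGetD sub i 0]
        else result) []
  PySem.List.sorted result (fun x => x) true

-- ===== PORT B =====
def get_contain_alt (l1 : List Int) (l2 : List Int) : List Int :=
  PySem.List.sorted (PySem.Set.inter (PySem.Set.ofList l1) (PySem.Set.ofList l2))
    (fun x => x) true

-- ===== PRECONDITION & SPEC =====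
def Spec_get_contain (l1 : List Int) (l2 : List Int) (out : List Int) : Prop := out = get_contain_alt l1 l2
instance (l1 : List Int) (l2 : List Int) (out : List Int) : Decidable (Spec_get_contain l1 l2 out) := by unfold Spec_get_contain; infer_instance

-- ===== CLAIM (what is proved, stated in full; the proofs are below) =====
def Claim_equal_get_contain : Prop := ∀ (l1 : List Int) (l2 : List Int), Dom_get_contain l1 l2 → Spec_get_contain l1 l2 (get_contain l1 l2)

-- ===== LEMMAS AND PROOFS =====

-- A's loop accumulates exactly set(filter (· ∈ obj) sub) onto the accumulator.
theorem get_contain_loop_eq (obj : List Int) :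
    ∀ (sub acc : List Int),
      sub.foldl
        (fun result v =>
          if obj.contains v && !(result.contains v) then result ++ [v] else result) acc
      = (sub.filter (fun v => obj.contains v)).foldl PySem.Set.add acc := by
  intro sub
  induction sub with
  | nil => intro acc; rfl
  | cons x xs ih =>
    intro acc
    simp only [List.foldl_cons, List.filter_cons]
    have hhead : (if (obj.contains x && !acc.contains x) = true then acc ++ [x] else acc)
        = if x ∈ obj then PySem.Set.add acc x else acc := by
      by_cases hx : x ∈ obj <;> by_cases hm : x ∈ acc <;>
        simp [hx, hm]
    by_cases hx : x ∈ obj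
    · have hx' : obj.contains x = true := by simpa using hx
      rw [hhead, if_pos hx, hx', if_pos rfl, List.foldl_cons, ih]
    · have hx' : obj.contains x = false := by simpa using hx
      rw [hhead, if_neg hx, hx']
      simp only [Bool.false_eq_true, if_false]
      exact ih acc

-- the two unordered collections have the same members
theorem members_eq (l1 l2 sub obj : List Int)
    (h : (sub = l1 ∧ obj = l2) ∨ (sub = l2 ∧ obj = l1)) (x : Int) :
    (x ∈ PySem.Set.ofList (sub.filter (fun v => obj.contains v)) ↔
      x ∈ PySem.Set.inter (PySem.Set.ofList l1) (PySem.Set.ofList l2)) := by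
  rw [PySem.Set.mem_ofList, PySem.Set.mem_inter, PySem.Set.mem_ofList, PySem.Set.mem_ofList,
    List.mem_filter]
  rcases h with ⟨h1, h2⟩ | ⟨h1, h2⟩ <;> subst h1 <;> subst h2 <;>
    simp; tauto

-- ===== VERDICT (by name: the statement is the Claim_ definition above) =====
theorem get_contain_spec : Claim_equal_get_contain := by
  intro l1 l2 _
  unfold Spec_get_contain get_contain get_contain_alt
  simp only []
  set so := if l1.length > l2.length then (l1, l2) else (l2, l1) with hso
  have hcase : (so.1 = l1 ∧ so.2 = l2) ∨ (so.1 = l2 ∧ so.2 = l1) := by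
    by_cases h : l1.length > l2.length <;> simp [hso, h]
  rw [PySem.List.foldl_pyRange_zero_pyGetD so.1 0
    (fun result v => if (so.2.contains v && !result.contains v) = true then result ++ [v] else result) []]
  rw [get_contain_loop_eq, ← PySem.Set.ofList_eq_foldl]
  have hperm : (PySem.Set.ofList (List.filter (fun v => so.2.contains v) so.1)).Perm
      (PySem.Set.inter (PySem.Set.ofList l1) (PySem.Set.ofList l2)) := by
    rw [List.perm_ext_iff_of_nodup (PySem.Set.nodup_ofList _)
      (PySem.Set.nodup_inter _ _ (PySem.Set.nodup_ofList _))]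
    exact members_eq l1 l2 so.1 so.2 hcase
  have hZperm : (PySem.List.sorted (PySem.Set.inter (PySem.Set.ofList l1) (PySem.Set.ofList l2))
      (fun x => x) true).Perm (PySem.Set.ofList (List.filter (fun v => so.2.contains v) so.1)) :=
    (PySem.List.sorted_perm _ _ _).trans hperm.symm
  have hZgt : (PySem.List.sorted (PySem.Set.inter (PySem.Set.ofList l1) (PySem.Set.ofList l2))
      (fun x => x) true).Pairwise (fun a b => b < a) := by
    have hge := PySem.List.sorted_pairwise_rev
      (PySem.Set.inter (PySem.Set.ofList l1) (PySem.Set.ofList l2)) (fun x => x)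
    have hnd : (PySem.List.sorted (PySem.Set.inter (PySem.Set.ofList l1) (PySem.Set.ofList l2))
        (fun x => x) true).Nodup :=
      (PySem.List.sorted_perm _ _ _).symm.nodup (PySem.Set.nodup_inter _ _ (PySem.Set.nodup_ofList _))
    exact (hge.and hnd).imp (fun h => lt_of_le_of_ne h.1 (Ne.symm h.2))
  exact PySem.List.sorted_rev_eq_of_perm_of_pairwise_gt _ _ _ hZperm hZgt
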